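-- pv_equiv track=rewrite | github.com/AliCW/random-katas | python-venv/highest_ranking_number/kata_function/highest_rank.py | highest_rank
-- ===== SOURCE A (Python) =====
-- def highest_rank(array):
--     output = []
--     dict = {item: array.count(item) for item in array} #count integers
--
--     for key in dict:
--         output.append([int(key), dict[key]]) #append key/values to sublists
--
--     output = sorted(output, key=lambda x: x[1]) #sort sublists by occurrence
--     outputSorted = []
--
--     for arr in range(len(output)): #find duplicates
--         if output[arr][1] == output[len(output) - 1][1]:
--             outputSorted.append(output[arr][0])
--
--     return max(outputSorted)
-- ===== SOURCE B (Python) =====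
-- def highest_rank(array):
--     # Largest value among those with the highest occurrence count:
--     # one max() with a (count, value) key instead of dict + sort + filter + max.
--     return max(array, key=lambda x: (array.count(x), x))
-- ===== Notes on version B (the rewrite author's own statement) =====
-- stated objective: simpler
-- what changed: Replaces the dict comprehension, the stability-dependent sort by count, the index loop collecting max-count keys and the final max() by a single max() over the input with a lexicographic (count, value) key.
import Mathlib
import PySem

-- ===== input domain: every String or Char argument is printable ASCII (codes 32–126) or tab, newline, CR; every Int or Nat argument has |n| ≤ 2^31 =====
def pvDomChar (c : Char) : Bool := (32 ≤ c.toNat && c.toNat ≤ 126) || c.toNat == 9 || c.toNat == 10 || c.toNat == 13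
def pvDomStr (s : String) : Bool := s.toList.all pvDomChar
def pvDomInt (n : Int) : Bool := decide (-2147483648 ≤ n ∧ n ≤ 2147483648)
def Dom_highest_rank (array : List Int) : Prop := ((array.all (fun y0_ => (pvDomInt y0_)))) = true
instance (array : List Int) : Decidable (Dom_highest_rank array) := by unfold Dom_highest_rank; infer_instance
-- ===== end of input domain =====

-- B replaces A's dict + stable sort by count + index-loop filter + max by a single
-- max over the input with a lexicographic (count, value) key; objective: simpler.


-- ===== PORT A =====
def highest_rank (array : List Int) : Int :=
  -- dict = {item: array.count(item) for item in array}
  let d : PySem.Dict Int Int :=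
    array.foldl (fun d item => d.insert item ((PySem.List.count array item : Nat) : Int)) PySem.Dict.empty
  -- for key in dict: output.append([int(key), dict[key]])  (key is already an int; dict[key]
  -- never raises here since key ∈ dict, so getD 0 is exact)
  let output : List (Int × Int) := d.keys.foldl (fun out key => out ++ [(key, d.getD key 0)]) []
  -- output = sorted(output, key=lambda x: x[1])
  let output := PySem.List.sorted output (fun x => x.2) false
  -- for arr in range(len(output)): if output[arr][1] == output[len(output)-1][1]: append output[arr][0]
  -- (all indices are in range on Pre_, so pyGetD is exact)
  let outputSorted : List Int :=
    (PySem.List.pyRange 0 (output.length : Int)).foldl (fun acc arr =>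
      if (PySem.List.pyGetD output arr (0, 0)).2
           = (PySem.List.pyGetD output ((output.length : Int) - 1) (0, 0)).2
      then acc ++ [(PySem.List.pyGetD output arr (0, 0)).1] else acc) []
  -- return max(outputSorted)   (nonempty on Pre_; ValueError on [] is excluded by Pre_)
  (PySem.List.max? outputSorted (fun x => x)).getD 0

-- ===== PORT B =====
def highest_rank_alt (array : List Int) : Int :=
  -- max(array, key=lambda x: (array.count(x), x))  (ValueError on [] is excluded by Pre_)
  (PySem.List.max2? array (fun x => ((PySem.List.count array x : Nat) : Int)) (fun x => x)).getD 0

-- ===== PRECONDITION & SPEC =====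
-- Pre_ excludes only the empty list, on which both Pythons raise ValueError (max of empty sequence).
def Pre_highest_rank (array : List Int) : Prop := array ≠ []
instance (array : List Int) : Decidable (Pre_highest_rank array) := by unfold Pre_highest_rank; infer_instance
def pvWitness_highest_rank : List Int := ([1, 2, 2, -3])

def Spec_highest_rank (array : List Int) (out : Int) : Prop := out = highest_rank_alt array
instance (array : List Int) (out : Int) : Decidable (Spec_highest_rank array out) := by unfold Spec_highest_rank; infer_instance

-- ===== CLAIM (what is proved, stated in full; the proofs are below) =====
def Claim_equal_highest_rank : Prop := ∀ (array : List Int), Dom_highest_rank array → Pre_highest_rank array → Spec_highest_rank array (highest_rank array)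

-- ===== LEMMAS AND PROOFS =====

-- lexicographic order on the (count, value) key pair
def lexle (k1 k2 : Int → Int) (a b : Int) : Prop :=
  k1 a < k1 b ∨ (k1 a = k1 b ∧ k2 a ≤ k2 b)

theorem lexle_refl (k1 k2 : Int → Int) (a : Int) : lexle k1 k2 a a := by
  simp [lexle]

theorem lexle_trans {k1 k2 : Int → Int} {a b c : Int}
    (h1 : lexle k1 k2 a b) (h2 : lexle k1 k2 b c) : lexle k1 k2 a c := by
  unfold lexle at *; rcases h1 with h1 | ⟨h1, h1'⟩ <;> rcases h2 with h2 | ⟨h2, h2'⟩ <;> omega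

-- the max2? fold step, named so the fold can be rewritten one step at a time
def m2step (k1 k2 : Int → Int) (acc : Option Int) (x : Int) : Option Int :=
  match acc with
  | none => some x
  | some m =>
    if (decide (k1 m < k1 x) || !decide (k1 x < k1 m) && decide (k2 m < k2 x)) = true
    then some x else some m

theorem max2?_eq_foldl (k1 k2 : Int → Int) (xs : List Int) :
    PySem.List.max2? xs k1 k2 = xs.foldl (m2step k1 k2) none := by
  simp only [PySem.List.max2?]
  exact List.foldl_ext _ _ none fun a b _ => by cases a <;> rfl

-- invariant of the max2? fold
theorem max2_fold_spec (k1 k2 : Int → Int) :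
    ∀ (l : List Int) (m : Int), ∃ m',
      l.foldl (m2step k1 k2) (some m) = some m'
      ∧ (m' = m ∨ m' ∈ l) ∧ lexle k1 k2 m m' ∧ ∀ y ∈ l, lexle k1 k2 y m' := by
  intro l
  induction l with
  | nil => intro m; exact ⟨m, rfl, Or.inl rfl, lexle_refl k1 k2 m, by simp⟩
  | cons x t ih =>
    intro m
    rw [List.foldl_cons]
    by_cases hc : (decide (k1 m < k1 x) || !decide (k1 x < k1 m) && decide (k2 m < k2 x)) = true
    · rw [show m2step k1 k2 (some m) x = some x from by simp [m2step, hc]]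
      obtain ⟨m', h1, h2, h3, h4⟩ := ih x
      refine ⟨m', h1, ?_, ?_, ?_⟩
      · rcases h2 with h | h <;> simp [h]
      · refine lexle_trans ?_ h3
        simp only [Bool.or_eq_true, Bool.and_eq_true, decide_eq_true_eq, Bool.not_eq_true',
          decide_eq_false_iff_not] at hc
        unfold lexle; omega
      · intro y hy
        rcases List.mem_cons.mp hy with h | h
        · exact h ▸ h3
        · exact h4 y h
    · rw [show m2step k1 k2 (some m) x = some m from by simp [m2step] at hc ⊢; omega]
      obtain ⟨m', h1, h2, h3, h4⟩ := ih m
      refine ⟨m', h1, ?_, h3, ?_⟩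
      · rcases h2 with h | h <;> simp [h]
      · intro y hy
        rcases List.mem_cons.mp hy with h | h
        · subst h
          refine lexle_trans ?_ h3
          simp only [Bool.or_eq_true, Bool.and_eq_true, decide_eq_true_eq, Bool.not_eq_true',
            decide_eq_false_iff_not, not_or, not_and_or] at hc
          unfold lexle; omega
        · exact h4 y h

theorem max2?_spec (k1 k2 : Int → Int) (xs : List Int) (hne : xs ≠ []) :
    ∃ m, PySem.List.max2? xs k1 k2 = some m ∧ m ∈ xs ∧ ∀ y ∈ xs, lexle k1 k2 y m := by
  cases xs with
  | nil => exact absurd rfl hne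
  | cons z t =>
    obtain ⟨m', h1, h2, h3, h4⟩ := max2_fold_spec k1 k2 t z
    refine ⟨m', ?_, ?_, ?_⟩
    · rw [max2?_eq_foldl, List.foldl_cons]
      exact h1
    · rcases h2 with h | h
      · simp [h]
      · exact List.mem_cons_of_mem _ h
    · intro y hy
      rcases List.mem_cons.mp hy with h | h
      · exact h ▸ h3
      · exact h4 y h

-- max? with the identity key picks THE maximum
theorem max?_id_eq {xs : List Int} {m : Int} (hm : m ∈ xs) (hle : ∀ y ∈ xs, y ≤ m) :
    PySem.List.max? xs (fun x => x) = some m := by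
  cases h : PySem.List.max? xs (fun x => x) with
  | none =>
    rw [PySem.List.max?_eq_none_iff] at h
    subst h; exact absurd hm (List.not_mem_nil)
  | some m' =>
    have h1 := PySem.List.max?_mem h
    have h2 := PySem.List.max?_isMax h m hm
    have h3 := hle m' h1
    simp only [Option.some.injEq]
    omega

-- after the insert loop, the dict maps every seen key to c k
theorem getD_fold_insert (c : Int → Int) :
    ∀ (l : List Int) (d : PySem.Dict Int Int) (k : Int),
      (l.foldl (fun d x => d.insert x (c x)) d).getD k 0
        = if k ∈ l then c k else d.getD k 0 := by
  intro l
  induction l with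
  | nil => intro d k; simp
  | cons x t ih =>
    intro d k
    simp only [List.foldl_cons, ih, PySem.Dict.getD_insert, List.mem_cons]
    by_cases h1 : k ∈ t <;> by_cases h2 : k = x <;> simp [h1, h2]

-- every element of so has snd ≤ the last element's snd
theorem snd_le_getElem_last {xs : List (Int × Int)} {p : Int × Int}
    (hp : p ∈ PySem.List.sorted xs (fun x => x.2))
    (hlen : 0 < (PySem.List.sorted xs (fun x => x.2)).length) :
    p.2 ≤ ((PySem.List.sorted xs (fun x => x.2))[(PySem.List.sorted xs (fun x => x.2)).length - 1]'(by omega)).2 := by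
  obtain ⟨i, hi, hget⟩ := List.mem_iff_getElem.mp hp
  have := PySem.List.key_sorted_getElem_mono xs (fun x => x.2)
    (p := i) (q := (PySem.List.sorted xs (fun x => x.2)).length - 1) (by omega) (by omega)
  simpa [hget] using this

-- ===== VERDICT (by name: the statement is the Claim_ definition above) =====
theorem highest_rank_spec : Claim_equal_highest_rank := by
  intro array _ hpre
  unfold Spec_highest_rank highest_rank highest_rank_alt
  obtain ⟨m, hB, hmem, hlex⟩ :=
    max2?_spec (fun x => ((PySem.List.count array x : Nat) : Int)) (fun x => x) array hpre
  rw [hB, Option.getD_some]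
  -- name the stages of A's pipeline
  set d : PySem.Dict Int Int :=
    array.foldl (fun d item => d.insert item ((PySem.List.count array item : Nat) : Int))
      PySem.Dict.empty with hd
  have hgetD : ∀ k, d.getD k 0 = if k ∈ array then ((PySem.List.count array k : Nat) : Int) else 0 := by
    intro k; rw [hd, getD_fold_insert (fun x => ((PySem.List.count array x : Nat) : Int)) array PySem.Dict.empty k]
    simp
  have hkeys : d.keys = PySem.Set.ofList array := by
    rw [hd, PySem.Dict.keys_foldl_insert array (fun _ item => ((PySem.List.count array item : Nat) : Int)) PySem.Dict.empty]
    simp [PySem.Set.update, PySem.Set.ofList, PySem.Dict.keys_empty]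
  set c : Int → Int := fun x => ((PySem.List.count array x : Nat) : Int) with hcdef
  simp only []
  have hout : d.keys.foldl (fun out key => out ++ [(key, d.getD key 0)]) [] =
      (PySem.Set.ofList array).map (fun k => (k, c k)) := by
    rw [PySem.List.foldl_append_singleton_eq_map (fun key => (key, d.getD key 0)) d.keys [],
      hkeys, List.nil_append]
    refine List.map_congr_left ?_
    intro k hk
    have hk' : k ∈ array := (PySem.Set.mem_ofList array k).mp hk
    rw [hgetD k, if_pos hk']
  rw [hout]
  set so : List (Int × Int) :=
    PySem.List.sorted ((PySem.Set.ofList array).map (fun k => (k, c k))) (fun x => x.2) false with hso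
  -- membership description of so
  have hmemso : ∀ p ∈ so, ∃ k, k ∈ array ∧ p = (k, c k) := by
    intro p hp
    rw [hso, PySem.List.mem_sorted, List.mem_map] at hp
    obtain ⟨k, hk, hpk⟩ := hp
    exact ⟨k, (PySem.Set.mem_ofList array k).mp hk, hpk.symm⟩
  have hmso : (m, c m) ∈ so := by
    rw [hso, PySem.List.mem_sorted, List.mem_map]
    exact ⟨m, (PySem.Set.mem_ofList array m).mpr hmem, rfl⟩
  have hlen : 0 < so.length := List.length_pos_of_mem hmso
  -- the last element of so
  have hlast : PySem.List.pyGetD so ((so.length : Int) - 1) (0, 0) = so[so.length - 1]'(by omega) := by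
    have h1 : ((so.length : Int) - 1) = ((so.length - 1 : Nat) : Int) := by omega
    rw [h1, PySem.List.pyGetD_natCast, List.getD_eq_getElem _ _ (by omega)]
  set K : Int × Int := PySem.List.pyGetD so ((so.length : Int) - 1) (0, 0) with hK
  -- K is the maximal occurrence count, which equals c m
  have hKmem : K ∈ so := by rw [hlast]; exact List.getElem_mem _
  have hKsnd : K.2 = c m := by
    have hle : K.2 ≤ c m := by
      obtain ⟨k, hk, hpk⟩ := hmemso K hKmem
      have := hlex k hk
      unfold lexle at this
      simp only [hpk]
      omega
    have hge : c m ≤ K.2 := by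
      rw [hlast]
      exact snd_le_getElem_last hmso hlen
    omega
  -- the index loop is a filter over so
  have hloop : (PySem.List.pyRange 0 (so.length : Int)).foldl (fun acc arr =>
        if (PySem.List.pyGetD so arr (0, 0)).2 = K.2
        then acc ++ [(PySem.List.pyGetD so arr (0, 0)).1] else acc) []
      = (so.filter (fun q => decide (q.2 = K.2))).map Prod.fst := by
    rw [PySem.List.foldl_pyRange_zero_pyGetD' so (0, 0)
      (fun acc q => if q.2 = K.2 then acc ++ [q.1] else acc) []]
    have h := PySem.List.foldl_append_if (fun q : Int × Int => decide (q.2 = K.2)) Prod.fst so []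
    simp only [decide_eq_true_eq] at h
    rw [h, List.nil_append]
  rw [hloop]
  -- the final max picks m
  have hfin : PySem.List.max? ((so.filter (fun q => decide (q.2 = K.2))).map Prod.fst) (fun x => x) = some m := by
    apply max?_id_eq
    · rw [List.mem_map]
      exact ⟨(m, c m), List.mem_filter.mpr ⟨hmso, by simp [hKsnd]⟩, rfl⟩
    · intro y hy
      rw [List.mem_map] at hy
      obtain ⟨q, hq, hqy⟩ := hy
      obtain ⟨hqso, hqsnd⟩ := List.mem_filter.mp hq
      obtain ⟨k, hk, hpk⟩ := hmemso q hqso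
      have hl := hlex k hk
      unfold lexle at hl
      simp only [decide_eq_true_eq] at hqsnd
      subst hpk
      simp only at hl hqsnd ⊢
      subst hqy
      simp only
      omega
  rw [hfin, Option.getD_some]
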